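-- pv_equiv track=rewrite | github.com/matthewamiadamen/CA117 | bucketlist/magic_132.py | magicnum
-- ===== SOURCE A (Python) =====
-- def magicnum(k):
--   magicc = 0
--   j = 3
--   while True:
--     if all(c in ["3", "9"] for c in str(j)):
--       magicc = magicc + 1
--     if magicc == k:
--       return j
--     j = j + 1
-- ===== SOURCE B (Python) =====
-- def magicnum(k):
--     # k-th (1-indexed) number whose decimal digits are all 3 or 9.
--     # Binary-tree construction: parent index (k-1)//2, last digit 3 if k odd else 9.
--     if k <= 0:
--         return 0
--     return 10 * magicnum((k - 1) // 2) + (3 if k % 2 == 1 else 9)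
-- ===== Notes on version B (the rewrite author's own statement) =====
-- stated objective: faster
-- what changed: Replaces the linear scan over all integers (testing each one's digits) by a direct O(log k) recursive construction of the k-th number whose digits are all threes or nines, via its binary index; Pre_ excludes k <= 0, where A loops forever.
-- outside the precondition, e.g. on magicnum(0): A does not finish within the time limit, B returns 0
import Mathlib
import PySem

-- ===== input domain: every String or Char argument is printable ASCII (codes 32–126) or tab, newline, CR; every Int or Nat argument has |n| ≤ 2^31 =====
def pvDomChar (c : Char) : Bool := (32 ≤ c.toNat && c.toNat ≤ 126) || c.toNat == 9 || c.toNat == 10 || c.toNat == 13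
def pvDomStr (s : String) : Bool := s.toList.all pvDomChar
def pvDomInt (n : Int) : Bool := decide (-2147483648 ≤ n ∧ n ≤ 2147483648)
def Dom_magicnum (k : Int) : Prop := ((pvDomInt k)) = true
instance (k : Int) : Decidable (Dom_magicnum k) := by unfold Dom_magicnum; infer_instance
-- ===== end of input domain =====

-- B replaces A's scan over all integers by an O(log k) recursive construction of the
-- k-th all-3/9-digit number (objective: faster; Pre_ excludes k ≤ 0, where A never returns).

-- ===== PORT A =====
-- all(c in ["3", "9"] for c in str(j))
def pvMagicCheck (j : Int) : Bool := (PySem.Int.toChars j).all (fun c => c == '3' || c == '9')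

-- A's `while True:` loop, made total with a fuel counter; fuel exhaustion (the 0 branch)
-- is unreachable on Dom_magicnum ∧ Pre_magicnum, as the proof below shows.
def magicLoop (k magicc j : Int) : Nat → Int
  | 0 => 0
  | fuel + 1 =>
    let magicc' := if pvMagicCheck j then magicc + 1 else magicc
    if magicc' = k then j else magicLoop k magicc' (j + 1) fuel

def magicnum (k : Int) : Int := magicLoop k 0 3 (10 ^ 32)

-- ===== PORT B =====
def magicnum_alt (k : Int) : Int :=
  if h : k ≤ 0 then 0
  else 10 * magicnum_alt (PySem.Int.floordiv (k - 1) 2) + (if PySem.Int.mod k 2 = 1 then 3 else 9)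
termination_by k.toNat
decreasing_by
  rw [PySem.Int.floordiv_eq_ediv_of_pos (by omega)]
  omega

-- ===== PRECONDITION & SPEC =====
-- Pre_ excludes k ≤ 0: there A's while-loop never returns (the count never reaches k).
def Pre_magicnum (k : Int) : Prop := 1 ≤ k
instance (k : Int) : Decidable (Pre_magicnum k) := by unfold Pre_magicnum; infer_instance
def pvWitness_magicnum : Int := 1

def Spec_magicnum (k : Int) (out : Int) : Prop := out = magicnum_alt k
instance (k : Int) (out : Int) : Decidable (Spec_magicnum k out) := by unfold Spec_magicnum; infer_instance

-- ===== CLAIM (what is proved, stated in full; the proofs are below) =====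
def Claim_equal_magicnum : Prop := ∀ (k : Int), Dom_magicnum k → Pre_magicnum k → Spec_magicnum k (magicnum k)

-- ===== LEMMAS AND PROOFS =====

-- Arithmetic version of "all decimal digits are 3 or 9" (proof-side helper).
def magicB (n : Int) : Bool :=
  if h : n ≤ 0 then n == 0
  else (n % 10 == 3 || n % 10 == 9) && magicB (n / 10)
termination_by n.toNat
decreasing_by omega

-- Enumeration index of a magic number (inverse of magicnum_alt; proof-side helper).
def idxOf (n : Int) : Int :=
  if h : n ≤ 0 then 0
  else 2 * idxOf (n / 10) + (if n % 10 = 3 then 1 else 2)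
termination_by n.toNat
decreasing_by omega

theorem magicnum_alt_nonpos {k : Int} (h : k ≤ 0) : magicnum_alt k = 0 := by
  rw [magicnum_alt]; simp [h]

theorem magicnum_alt_pos {k : Int} (h : 0 < k) :
    magicnum_alt k = 10 * magicnum_alt ((k - 1) / 2) + (if k % 2 = 1 then 3 else 9) := by
  rw [magicnum_alt]
  rw [PySem.Int.floordiv_eq_ediv_of_pos (by omega), PySem.Int.mod_eq_emod_of_pos (by omega)]
  simp [show ¬ k ≤ 0 by omega]

theorem magicnum_alt_lb (k : Int) (h : 1 ≤ k) : 3 ≤ magicnum_alt k := by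
  rw [magicnum_alt_pos (by omega)]
  by_cases hp : 1 ≤ (k - 1) / 2
  · have := magicnum_alt_lb ((k - 1) / 2) hp
    split_ifs <;> omega
  · have h0 : (k - 1) / 2 = 0 := by omega
    rw [h0, magicnum_alt_nonpos le_rfl]
    split_ifs <;> omega
termination_by k.toNat
decreasing_by all_goals omega

theorem magicnum_alt_mono (b : Int) : ∀ a : Int, 0 ≤ a → a < b → magicnum_alt a < magicnum_alt b := by
  intro a ha hab
  have hb1 : 1 ≤ b := by omega
  rw [magicnum_alt_pos (k := b) (by omega)]
  by_cases ha0 : a = 0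
  · subst ha0
    rw [magicnum_alt_nonpos le_rfl]
    have : 0 ≤ magicnum_alt ((b - 1) / 2) := by
      by_cases h1 : 1 ≤ (b - 1) / 2
      · have := magicnum_alt_lb _ h1; omega
      · rw [magicnum_alt_nonpos (by omega)]
    split_ifs <;> omega
  · rw [magicnum_alt_pos (k := a) (by omega)]
    by_cases hp : (a - 1) / 2 = (b - 1) / 2
    · -- same parent: a odd, b even
      have hpar : a % 2 = 1 ∧ b % 2 = 0 := by omega
      rw [hp]
      simp [hpar.1, hpar.2]
    · have hplt : (a - 1) / 2 < (b - 1) / 2 := by omega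
      have ih := magicnum_alt_mono ((b - 1) / 2) ((a - 1) / 2) (by omega) hplt
      split_ifs <;> omega
termination_by b.toNat
decreasing_by omega

theorem magicB_zero : magicB 0 = true := by rw [magicB]; simp

theorem magicnum_alt_magic (k : Int) (h : 0 ≤ k) : magicB (magicnum_alt k) = true := by
  by_cases h0 : k = 0
  · subst h0; rw [magicnum_alt_nonpos le_rfl]; exact magicB_zero
  · rw [magicnum_alt_pos (by omega)]
    have hple : 0 ≤ (k - 1) / 2 := by omega
    have ihm := magicnum_alt_magic ((k - 1) / 2) hple
    have hnn : 0 ≤ magicnum_alt ((k - 1) / 2) := by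
      by_cases h1 : 1 ≤ (k - 1) / 2
      · have := magicnum_alt_lb _ h1; omega
      · rw [magicnum_alt_nonpos (by omega)]
    set m := magicnum_alt ((k - 1) / 2) with hm
    have key : ∀ d : Int, d = 3 ∨ d = 9 → magicB (10 * m + d) = true := by
      intro d hd
      rw [magicB]
      have hpos : ¬ (10 * m + d ≤ 0) := by omega
      simp only [hpos]
      have hmod : (10 * m + d) % 10 = d := by omega
      have hdiv : (10 * m + d) / 10 = m := by omega
      rw [hmod, hdiv]
      rcases hd with h | h <;> simp [h, ihm]
    split_ifs with hpar
    · exact key 3 (Or.inl rfl)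
    · exact key 9 (Or.inr rfl)
termination_by k.toNat
decreasing_by omega

theorem idxOf_spec (n : Int) (h1 : 1 ≤ n) (hm : magicB n = true) :
    1 ≤ idxOf n ∧ magicnum_alt (idxOf n) = n := by
  rw [magicB] at hm
  simp only [show ¬ n ≤ 0 by omega, dif_neg, not_false_iff, Bool.and_eq_true, Bool.or_eq_true,
    beq_iff_eq] at hm
  obtain ⟨hd, hrest⟩ := hm
  have hq0 : 0 ≤ idxOf (n / 10) ∧ magicnum_alt (idxOf (n / 10)) = n / 10 := by
    by_cases h10 : n < 10
    · have : n / 10 = 0 := by omega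
      rw [this]
      constructor
      · rw [idxOf]; simp
      · rw [idxOf]; simp [magicnum_alt_nonpos]
    · have ih := idxOf_spec (n / 10) (by omega) hrest
      exact ⟨by omega, ih.2⟩
  obtain ⟨hq, hqv⟩ := hq0
  rw [idxOf]
  simp only [show ¬ n ≤ 0 by omega, dif_neg, not_false_iff]
  set q := idxOf (n / 10) with hqdef
  have key : ∀ e : Int, e = 1 ∨ e = 2 →
      magicnum_alt (2 * q + e) = 10 * (n / 10) + (if (2 * q + e) % 2 = 1 then 3 else 9) := by
    intro e he
    rw [magicnum_alt_pos (by omega)]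
    have : (2 * q + e - 1) / 2 = q := by omega
    rw [this, hqv]
  split_ifs with h3
  · refine ⟨by omega, ?_⟩
    rw [key 1 (Or.inl rfl)]
    have : (2 * q + 1) % 2 = 1 := by omega
    simp [this]; omega
  · refine ⟨by omega, ?_⟩
    rw [key 2 (Or.inr rfl)]
    have : (2 * q + 2) % 2 = 0 := by omega
    have hd9 : n % 10 = 9 := by tauto
    simp [this]; omega
termination_by n.toNat
decreasing_by omega

theorem magicnum_alt_bound : ∀ (L : Nat) (k : Int), 0 ≤ k → k ≤ 2 ^ (L + 1) - 2 →
    magicnum_alt k ≤ 10 ^ L - 1 := by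
  intro L
  induction L with
  | zero =>
    intro k h0 hub
    norm_num at hub ⊢
    have : k = 0 := by omega
    rw [this, magicnum_alt_nonpos le_rfl]
  | succ L ih =>
    intro k h0 hub
    by_cases hk0 : k = 0
    · rw [hk0, magicnum_alt_nonpos le_rfl]
      have : (1:Int) ≤ 10 ^ (L + 1) := one_le_pow₀ (by norm_num)
      omega
    · rw [magicnum_alt_pos (by omega)]
      have h2 : (2:Int) ^ (L + 1 + 1) = 2 * 2 ^ (L + 1) := by ring
      have hp : (k - 1) / 2 ≤ 2 ^ (L + 1) - 2 := by omega
      have := ih ((k - 1) / 2) (by omega) hp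
      have h10 : (10:Int) ^ (L + 1) = 10 * 10 ^ L := by ring
      split_ifs <;> omega

theorem digitChar_39 (d : Nat) (h : d < 10) :
    ((Nat.digitChar d == '3' || Nat.digitChar d == '9')) = (decide (d = 3) || decide (d = 9)) := by
  interval_cases d <;> decide

theorem magicB_natCast (n : Nat) (h : 0 < n) :
    magicB (n : Int) = ((decide (n % 10 = 3) || decide (n % 10 = 9)) && magicB ((n / 10 : Nat) : Int)) := by
  rw [magicB]
  have h1 : ¬ ((n : Int) ≤ 0) := by omega
  simp only [h1, dif_neg, not_false_iff]
  have e3 : (n : Int) / 10 = ((n / 10 : Nat) : Int) := by omega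
  have b1 : ((n : Int) % 10 == 3) = decide (n % 10 = 3) := by
    by_cases h3 : n % 10 = 3 <;> simp [h3] <;> omega
  have b2 : ((n : Int) % 10 == 9) = decide (n % 10 = 9) := by
    by_cases h9 : n % 10 = 9 <;> simp [h9] <;> omega
  rw [e3, b1, b2]

theorem toDigitsCore_all : ∀ (fuel n : Nat) (acc : List Char), 0 < n → n < fuel →
    ((Nat.toDigitsCore 10 fuel n acc).all (fun c => c == '3' || c == '9')) =
      (magicB (n : Int) && acc.all (fun c => c == '3' || c == '9')) := by
  intro fuel
  induction fuel with
  | zero => intro n acc h0 hf; omega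
  | succ f ih =>
    intro n acc h0 hf
    rw [magicB_natCast n h0]
    by_cases hq : n / 10 = 0
    · have : Nat.toDigitsCore 10 (f + 1) n acc = (n % 10).digitChar :: acc := by
        simp [Nat.toDigitsCore, hq]
      rw [this, hq]
      simp [digitChar_39 (n % 10) (by omega), magicB_zero]
    · have hstep : Nat.toDigitsCore 10 (f + 1) n acc =
          Nat.toDigitsCore 10 f (n / 10) ((n % 10).digitChar :: acc) := by
        simp [Nat.toDigitsCore, hq]
      rw [hstep, ih (n / 10) _ (by omega) (by omega)]
      simp [digitChar_39 (n % 10) (by omega), Bool.and_assoc, Bool.and_comm]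

theorem pvMagicCheck_eq_magicB (j : Int) (h : 1 ≤ j) : pvMagicCheck j = magicB j := by
  unfold pvMagicCheck
  rw [PySem.Int.toChars]
  simp only [show ¬ j < 0 by omega, if_neg, not_false_iff]
  rw [Nat.toDigits, toDigitsCore_all (j.toNat + 1) j.toNat [] (by omega) (by omega)]
  simp [Int.toNat_of_nonneg (by omega : (0:Int) ≤ j)]

theorem magicnum_alt_mono_le (b a : Int) (ha : 0 ≤ a) (hab : a ≤ b) :
    magicnum_alt a ≤ magicnum_alt b := by
  rcases eq_or_lt_of_le hab with h | h
  · rw [h]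
  · exact le_of_lt (magicnum_alt_mono b a ha h)

-- no magic number lies strictly between two consecutive enumerated ones
theorem no_magic_between (c n : Int) (hc : 0 ≤ c)
    (h1 : magicnum_alt c < n) (h2 : n < magicnum_alt (c + 1)) : magicB n = false := by
  by_contra h
  have hmt : magicB n = true := by revert h; cases magicB n <;> simp
  have hn1 : 1 ≤ n := by
    by_cases hc0 : c = 0
    · subst hc0; rw [magicnum_alt_nonpos le_rfl] at h1; omega
    · have := magicnum_alt_lb c (by omega); omega
  obtain ⟨hi1, hiv⟩ := idxOf_spec n hn1 hmt
  set i := idxOf n with hidef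
  by_cases hle : i ≤ c
  · have := magicnum_alt_mono_le c i (by omega) hle
    omega
  · have := magicnum_alt_mono_le i (c + 1) (by omega) (by omega)
    omega

-- Loop invariant: c magic numbers lie below j, the next one is magicnum_alt (c+1).
theorem loop_inv : ∀ (fuel : Nat) (k c j : Int), 0 ≤ c → c < k → 1 ≤ j →
    j ≤ magicnum_alt (c + 1) →
    (∀ n, j ≤ n → n < magicnum_alt (c + 1) → magicB n = false) →
    (magicnum_alt k - j).toNat < fuel →
    magicLoop k c j fuel = magicnum_alt k := by
  intro fuel
  induction fuel with
  | zero => intro k c j _ _ _ _ _ hf; omega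
  | succ f ih =>
    intro k c j hc hck hj1 hjle hnomagic hf
    have hkM := magicnum_alt_lb k (by omega)
    have hc1M := magicnum_alt_lb (c + 1) (by omega)
    have hMle : magicnum_alt (c + 1) ≤ magicnum_alt k :=
      magicnum_alt_mono_le k (c + 1) (by omega) (by omega)
    rcases eq_or_lt_of_le hjle with heq | hlt
    · -- j is the (c+1)-st magic number
      have hmagic : magicB j = true := by rw [heq]; exact magicnum_alt_magic (c + 1) (by omega)
      have hcheck : pvMagicCheck j = true := by rw [pvMagicCheck_eq_magicB j hj1]; exact hmagic
      simp only [magicLoop, hcheck, if_true]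
      by_cases hck1 : c + 1 = k
      · rw [if_pos hck1, heq, hck1]
      · rw [if_neg hck1]
        have hc2M : magicnum_alt (c + 1) < magicnum_alt (c + 1 + 1) :=
          magicnum_alt_mono (c + 1 + 1) (c + 1) (by omega) (by omega)
        have hMle2 : magicnum_alt (c + 1 + 1) ≤ magicnum_alt k :=
          magicnum_alt_mono_le k (c + 1 + 1) (by omega) (by omega)
        apply ih k (c + 1) (j + 1) (by omega) (by omega) (by omega) (by omega)
        · intro n hn1 hn2
          exact no_magic_between (c + 1) n (by omega) (by omega) hn2
        · omega
    · -- j is below the next magic number, so it is not magic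
      have hmagic : magicB j = false := hnomagic j le_rfl hlt
      have hcheck : pvMagicCheck j = false := by rw [pvMagicCheck_eq_magicB j hj1]; exact hmagic
      simp only [magicLoop, hcheck, if_false, Bool.false_eq_true]
      rw [if_neg (by omega : ¬ c = k)]
      apply ih k c (j + 1) hc hck (by omega) (by omega)
      · intro n hn1 hn2
        exact hnomagic n (by omega) hn2
      · omega

-- ===== VERDICT (by name: the statement is the Claim_ definition above) =====
theorem magicnum_spec : Claim_equal_magicnum := by
  intro k hdom hpre
  have hdom' : -2147483648 ≤ k ∧ k ≤ 2147483648 := by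
    simpa [Dom_magicnum, pvDomInt] using hdom
  have hpre' : 1 ≤ k := hpre
  unfold Spec_magicnum magicnum
  have hb := magicnum_alt_bound 31 k (by omega) (by norm_num; omega)
  have hk3 := magicnum_alt_lb k hpre'
  have h1' : magicnum_alt (0 + 1) = 3 := by
    rw [magicnum_alt_pos (by norm_num)]
    norm_num [magicnum_alt_nonpos]
  apply loop_inv _ k 0 3 le_rfl hpre' (by norm_num) (by omega)
  · intro n hn1 hn2; omega
  · norm_num at hb ⊢
    omega
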